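-- pv_equiv track=rewrite | github.com/XiaotongShen/Data-Structure-and-Algorithm | Zuo/Basic/Class20/Code03_Coffee.py | min_time1
-- ===== SOURCE A (Python) =====
-- from queue import PriorityQueue
--
-- def min_time1(arr: list, n: int, a: int, b: int):
--     heap = PriorityQueue()
--     for i in range(len(arr)):
--         # 将三个值的tuple放入小根堆:(当前做完一杯咖啡到达的时间点，当前可以开始做咖啡的时间点，做一杯咖啡需要的时间)
--         # 以做完咖啡的时间排序做小根堆
--         heap.put((0 + arr[i], 0, arr[i]))
--     drinks = [0] * n  # n个人喝完咖啡的时间,初始化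
--     for i in range(n):
--         cur = heap.get()  # 堆顶弹出一个最快做出咖啡的咖啡机
--         drinks[i] = cur[0]  # 将咖啡完成的时间计入i号客人喝完咖啡的时间
--         cur_updated = (cur[0] + cur[2], cur[1] + cur[2], cur[2])  # 咖啡机当前完成的时间 ++; 咖啡机当前可用的时间 ++
--         heap.put(cur_updated)  # 将更新后的咖啡机重新压入小根堆，依次直到所有客人服务完
--     # 以上获得了每个客人喝完咖啡的时间
--     return best_time(drinks, a, b, 0, 0)
--
-- def best_time(drinks: list, wash: int, air: int, idx: int, free: int):
--     """
--     drinks: 所有杯子可以开始洗的时间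
--     wash: 单杯洗干净的时间（串行）
--     air：挥发干净的时间（并行）
--     free: 洗的机器什么时候可以用
--     drinks[index...]都变干净，最早结束的时间（返回值）
--     """
--     if idx == len(drinks):
--         # 如果当前已经超过了最后一个index（len(drinks）-1)
--         return 0
--     # idx号杯子决定洗
--     self_clean1 = max(drinks[idx], free) + wash
--     rest_clean1 = best_time(drinks, wash, air, idx + 1, self_clean1)
--     p1 = max(self_clean1, rest_clean1)
--     # idx号杯子决定挥发
--     self_clean2 = drinks[idx] + air  # 咖啡喝完即可挥发，需要时间air
--     rest_clean2 = best_time(drinks, wash, air, idx + 1, free)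
--     p2 = max(self_clean2, rest_clean2)
--     return min(p1, p2)
-- ===== SOURCE B (Python) =====
-- import heapq
--
-- def min_time1(arr: list, n: int, a: int, b: int):
--     # phase 1: simulate the machines with heapq instead of queue.PriorityQueue
--     heap = [(x, 0, x) for x in arr]
--     heapq.heapify(heap)
--     drinks = []
--     for _ in range(n):
--         finish, avail, t = heapq.heappop(heap)
--         drinks.append(finish)
--         heapq.heappush(heap, (finish + t, avail + t, t))
--     # phase 2: memoized recursion over (idx, free) instead of A's plain 2^n recursion
--     memo = {}
--     def best(idx, free):
--         if idx == len(drinks):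
--             return 0
--         key = (idx, free)
--         if key in memo:
--             return memo[key]
--         wash_done = max(drinks[idx], free) + a
--         p1 = max(wash_done, best(idx + 1, wash_done))
--         p2 = max(drinks[idx] + b, best(idx + 1, free))
--         memo[key] = min(p1, p2)
--         return memo[key]
--     return best(0, 0)
-- ===== Notes on version B (the rewrite author's own statement) =====
-- stated objective: faster
-- what changed: B memoizes the cup-cleaning recursion on the (idx, free) state (and uses heapq instead of queue.PriorityQueue for the machine simulation), replacing A's plain 2^n branching recursion; intended as faster: that run measured B 14.66x at n=64 with A timing out beyond, though at the largest size both finished a timing run could not confirm a ratio.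
-- outside the precondition, e.g. on min_time1([], 1, 1, 1): A does not finish within the time limit, B raises IndexError; on min_time1([1], 980, 1, 1): A does not finish within the time limit, B returns 981
import Mathlib
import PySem

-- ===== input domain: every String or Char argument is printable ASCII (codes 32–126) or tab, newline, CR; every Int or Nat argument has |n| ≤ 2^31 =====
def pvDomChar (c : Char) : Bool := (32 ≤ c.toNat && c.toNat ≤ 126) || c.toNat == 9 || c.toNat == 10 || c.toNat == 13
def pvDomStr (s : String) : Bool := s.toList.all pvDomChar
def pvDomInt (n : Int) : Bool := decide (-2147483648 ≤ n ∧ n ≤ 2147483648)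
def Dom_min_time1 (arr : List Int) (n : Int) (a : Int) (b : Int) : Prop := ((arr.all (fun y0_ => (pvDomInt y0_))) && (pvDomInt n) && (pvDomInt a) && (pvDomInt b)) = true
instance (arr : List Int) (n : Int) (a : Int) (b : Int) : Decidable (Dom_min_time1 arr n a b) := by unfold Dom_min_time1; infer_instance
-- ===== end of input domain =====

-- B replaces A's exponential best_time recursion by the same recursion memoized on the
-- (idx, free) state; the machine simulation uses heapq instead of queue.PriorityQueue.
-- Both library priority queues pop the lexicographically smallest (finish, avail, time) triple,
-- modeled here once (for both ports) as a lexicographically sorted list (pqPut/pqGet/pqRest).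

-- ===== PORT A =====
-- lexicographic ≤ on Python's (finish, avail, time) tuples
def pqLe (x y : Int × Int × Int) : Bool :=
  x.1 < y.1 || (x.1 == y.1 && (x.2.1 < y.2.1 || (x.2.1 == y.2.1 && x.2.2 ≤ y.2.2)))

-- value model of the priority queue: sorted insert / pop the head
def pqPut (h : List (Int × Int × Int)) (x : Int × Int × Int) : List (Int × Int × Int) :=
  match h with
  | [] => [x]
  | y :: ys => if pqLe x y then x :: y :: ys else y :: pqPut ys x

def pqGet (h : List (Int × Int × Int)) : Int × Int × Int := h.headD (0, 0, 0)

def pqRest (h : List (Int × Int × Int)) : List (Int × Int × Int) := h.tail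

-- the 'for i in range(n)' loop: drinks[i] = cur[0] written in order i = 0,1,… = append
def brewStep (st : List (Int × Int × Int) × List Int) (_i : Int) :
    List (Int × Int × Int) × List Int :=
  let cur := pqGet st.1
  let upd := (cur.1 + cur.2.2, cur.2.1 + cur.2.2, cur.2.2)
  (pqPut (pqRest st.1) upd, st.2 ++ [cur.1])

-- best_time: Python recurses on idx with base idx == len(drinks); here on the suffix drinks[idx:]
def bestTimeA (wash air : Int) : List Int → Int → Int
  | [], _ => 0
  | d :: rest, free =>
      let selfClean1 := max d free + wash
      let restClean1 := bestTimeA wash air rest selfClean1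
      let p1 := max selfClean1 restClean1
      let selfClean2 := d + air
      let restClean2 := bestTimeA wash air rest free
      let p2 := max selfClean2 restClean2
      min p1 p2

def min_time1 (arr : List Int) (n : Int) (a : Int) (b : Int) : Int :=
  let heap := arr.foldl (fun h x => pqPut h (0 + x, 0, x)) []
  let st := (PySem.List.pyRange 0 n 1).foldl brewStep (heap, [])
  bestTimeA a b st.2 0

-- ===== PORT B =====
-- memoized best: memo maps (idx, free) to the result; state-passing for the Python dict
def bestTimeB (wash air : Int) : List Int → Int → Int → PySem.Dict (Int × Int) Int →
    Int × PySem.Dict (Int × Int) Int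
  | [], _, _, memo => (0, memo)
  | d :: rest, idx, free, memo =>
      match memo.get? (idx, free) with
      | some v => (v, memo)
      | none =>
          let washDone := max d free + wash
          let (r1, m1) := bestTimeB wash air rest (idx + 1) washDone memo
          let p1 := max washDone r1
          let (r2, m2) := bestTimeB wash air rest (idx + 1) free m1
          let p2 := max (d + air) r2
          let res := min p1 p2
          (res, m2.insert (idx, free) res)

def min_time1_alt (arr : List Int) (n : Int) (a : Int) (b : Int) : Int :=
  let heap := arr.foldl (fun h x => pqPut h (x, 0, x)) []
  let st := (PySem.List.pyRange 0 n 1).foldl brewStep (heap, [])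
  (bestTimeB a b st.2 0 0 PySem.Dict.empty).1

-- ===== PRECONDITION & SPEC =====
-- Pre_ excludes only inputs on which A returns no value: arr = [] with n > 0, where A's
-- queue.PriorityQueue().get() blocks forever (B's heappop raises IndexError there); and
-- n ≥ 960, where the depth-n best_time recursion reaches CPython's default recursion limit
-- and raises RecursionError (measured at n ≥ 996 from a top-level call; the cap leaves a
-- small margin for caller stack frames; B recurses to the same depth and raises there too).
def Pre_min_time1 (arr : List Int) (n : Int) (a : Int) (b : Int) : Prop :=
  (arr ≠ [] ∨ n ≤ 0) ∧ n < 960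
instance (arr : List Int) (n : Int) (a : Int) (b : Int) : Decidable (Pre_min_time1 arr n a b) := by unfold Pre_min_time1; infer_instance

def pvWitness_min_time1 : List Int × Int × Int × Int := ([2, 3, 5], 4, 1, 6)

def Spec_min_time1 (arr : List Int) (n : Int) (a : Int) (b : Int) (out : Int) : Prop := out = min_time1_alt arr n a b
instance (arr : List Int) (n : Int) (a : Int) (b : Int) (out : Int) : Decidable (Spec_min_time1 arr n a b out) := by unfold Spec_min_time1; infer_instance

-- ===== CLAIM (what is proved, stated in full; the proofs are below) =====
def Claim_equal_min_time1 : Prop := ∀ (arr : List Int) (n : Int) (a : Int) (b : Int), Dom_min_time1 arr n a b → Pre_min_time1 arr n a b → Spec_min_time1 arr n a b (min_time1 arr n a b)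

-- ===== LEMMAS AND PROOFS =====

-- every memo entry ((i, f), v) satisfies v = bestTimeA on the suffix drinks[i:]
def MemoOK (drinks : List Int) (wash air : Int) (m : PySem.Dict (Int × Int) Int) : Prop :=
  ∀ i f v, m.get? (i, f) = some v → v = bestTimeA wash air (drinks.drop i.toNat) f

lemma memoOK_empty (drinks : List Int) (wash air : Int) :
    MemoOK drinks wash air PySem.Dict.empty := by
  intro i f v h
  simp [PySem.Dict.get?_empty] at h

lemma bestTimeB_correct (drinks : List Int) (wash air : Int) :
    ∀ (suffix : List Int) (idx free : Int) (m : PySem.Dict (Int × Int) Int),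
      suffix = drinks.drop idx.toNat → 0 ≤ idx → MemoOK drinks wash air m →
      (bestTimeB wash air suffix idx free m).1 = bestTimeA wash air suffix free ∧
      MemoOK drinks wash air (bestTimeB wash air suffix idx free m).2 := by
  intro suffix
  induction suffix with
  | nil => intro idx free m _ _ hm; exact ⟨rfl, hm⟩
  | cons d rest ih =>
      intro idx free m hsuf hidx hm
      have hrest : rest = drinks.drop (idx + 1).toNat := by
        have h1 : (idx + 1).toNat = idx.toNat + 1 := by omega
        rw [h1, ← List.drop_drop, ← hsuf]
        simp
      cases hget : m.get? (idx, free) with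
      | some v =>
          have hv := hm idx free v hget
          rw [← hsuf] at hv
          constructor
          · simp [bestTimeB, hget, hv, bestTimeA]
          · simpa [bestTimeB, hget] using hm
      | none =>
          obtain ⟨ih1, ihm1⟩ := ih (idx + 1) (max d free + wash) m hrest (by omega) hm
          obtain ⟨ih2, ihm2⟩ := ih (idx + 1) free
            (bestTimeB wash air rest (idx + 1) (max d free + wash) m).2 hrest (by omega) ihm1
          have hres : (bestTimeB wash air (d :: rest) idx free m).1 =
              bestTimeA wash air (d :: rest) free := by
            simp only [bestTimeB, hget, bestTimeA]
            rw [ih1, ih2]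
          refine ⟨hres, ?_⟩
          intro i f v hv
          have h2 : (bestTimeB wash air (d :: rest) idx free m).2 =
              ((bestTimeB wash air rest (idx + 1) free
                (bestTimeB wash air rest (idx + 1) (max d free + wash) m).2).2).insert
                (idx, free) (bestTimeB wash air (d :: rest) idx free m).1 := by
            simp only [bestTimeB, hget]
          rw [h2, PySem.Dict.get?_insert] at hv
          by_cases hkey : (i, f) = (idx, free)
          · rw [if_pos hkey] at hv
            obtain ⟨hi, hf⟩ := Prod.mk.injEq .. ▸ hkey
            cases hv
            rw [hres, hi, hf, ← hsuf]
          · rw [if_neg hkey] at hv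
            exact ihm2 i f v hv

-- ===== VERDICT (by name: the statement is the Claim_ definition above) =====
theorem min_time1_spec : Claim_equal_min_time1 := by
  intro arr n a b _ _
  unfold Spec_min_time1 min_time1 min_time1_alt
  simp only [zero_add]
  set drinks := ((PySem.List.pyRange 0 n 1).foldl brewStep
    (arr.foldl (fun h x => pqPut h (x, 0, x)) [], [])).2 with hd
  have := (bestTimeB_correct drinks a b drinks 0 0 PySem.Dict.empty (by simp) le_rfl
    (memoOK_empty drinks a b)).1
  exact this.symm
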